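-- pv_equiv track=rewrite | github.com/gcsns/gc-pdf-util | src/utils/common.py | has_repetitive_words
-- ===== SOURCE A (Python) =====
-- def has_repetitive_words(input_string: str)-> bool:
--     # Split the input string into words
--     words = input_string.lower().split()
--
--     # Create a dictionary to store word counts
--     word_count = {}
--
--     # Iterate through each word
--     for word in words:
--         # Increment the count for this word in the dictionary
--         word_count[word] = word_count.get(word, 0) + 1
--
--     # Check if any word appears more than once
--     for count in word_count.values():
--         if count > 1:
--             return True  # Found repetitive words
--
--     return False  # No repetitive words found
-- ===== SOURCE B (Python) =====
-- def has_repetitive_words(input_string: str) -> bool: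
--     words = sorted(input_string.lower().split())
--     return any(a == b for a, b in zip(words, words[1:]))
-- ===== Notes on version B (the rewrite author's own statement) =====
-- stated objective: alternative
-- what changed: Replaces A's hash-based counting (dict of counts plus a second scan over the counts) with sort-based duplicate detection: sort the words and check whether any two adjacent words are equal.
import Mathlib
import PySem

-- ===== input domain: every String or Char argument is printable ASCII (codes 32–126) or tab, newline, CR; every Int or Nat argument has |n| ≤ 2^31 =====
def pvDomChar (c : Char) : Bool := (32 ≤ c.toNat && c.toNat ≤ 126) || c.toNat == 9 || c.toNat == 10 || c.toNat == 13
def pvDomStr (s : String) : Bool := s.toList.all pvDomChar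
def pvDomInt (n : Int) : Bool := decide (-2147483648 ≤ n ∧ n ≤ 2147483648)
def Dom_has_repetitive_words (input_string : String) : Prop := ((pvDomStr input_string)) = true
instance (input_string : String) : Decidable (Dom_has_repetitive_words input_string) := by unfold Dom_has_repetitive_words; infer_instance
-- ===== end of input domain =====

-- B replaces A's hash-based counting with sort-based duplicate detection (sort the words, scan adjacent pairs).

-- ===== PORT A =====
def has_repetitive_words (input_string : String) : Bool :=
  let words := PySem.Str.split₀ (PySem.Str.lower input_string)
  let word_count := words.foldl (fun d w => d.insert w (d.getD w 0 + 1)) (PySem.Dict.empty : PySem.Dict String Int)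
  -- 'for count in word_count.values(): if count > 1: return True' / 'return False'
  word_count.values.any (fun count => count > 1)

-- ===== PORT B =====
def has_repetitive_words_alt (input_string : String) : Bool :=
  let words := PySem.List.sorted (PySem.Str.split₀ (PySem.Str.lower input_string)) (fun x => x) false
  -- any(a == b for a, b in zip(words, words[1:]))
  (words.zip (PySem.List.slice words (some 1) none)).any (fun p => p.1 == p.2)

-- ===== PRECONDITION & SPEC =====
def Spec_has_repetitive_words (input_string : String) (out : Bool) : Prop := out = has_repetitive_words_alt input_string
instance (input_string : String) (out : Bool) : Decidable (Spec_has_repetitive_words input_string out) := by unfold Spec_has_repetitive_words; infer_instance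

-- ===== CLAIM (what is proved, stated in full; the proofs are below) =====
def Claim_equal_has_repetitive_words : Prop := ∀ (input_string : String), Dom_has_repetitive_words input_string → Spec_has_repetitive_words input_string (has_repetitive_words input_string)

-- ===== LEMMAS AND PROOFS =====

-- A's side: some count in Counter(l) exceeds 1 ↔ l has a duplicate.
theorem counterAny_eq_not_nodup (l : List String) :
    ((l.foldl (fun d w => d.insert w (d.getD w 0 + 1)) (PySem.Dict.empty : PySem.Dict String Int)).values.any
      (fun count => count > 1)) = decide (¬ l.Nodup) := by
  rw [PySem.Dict.foldl_insert_getD_add_one_eq_counter]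
  have hv : (PySem.Dict.counter l : PySem.Dict String Int).values
      = (PySem.Set.ofList l).map (fun k => (l.count k : Int)) := by
    simp only [PySem.Dict.values, PySem.Dict.items_counter, List.map_map]
    rfl
  rw [hv]
  simp only [List.any_map]
  rw [Bool.eq_iff_iff]
  simp only [List.any_eq_true, decide_eq_true_eq, Function.comp_apply,
    List.nodup_iff_count_le_one, not_forall, not_le]
  constructor
  · rintro ⟨k, hk, h⟩
    exact ⟨k, by exact_mod_cast h⟩
  · rintro ⟨k, h⟩
    refine ⟨k, ?_, by exact_mod_cast h⟩
    have : k ∈ l := List.count_pos_iff.mp (by omega)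
    simpa [PySem.Set.mem_ofList] using this

-- B's side: in a ≤-sorted list, two adjacent words are equal ↔ the list has a duplicate.
theorem adjacentEq_eq_not_nodup (s : List String) (hs : s.Pairwise (· ≤ ·)) :
    ((s.zip s.tail).any (fun p => p.1 == p.2)) = decide (¬ s.Nodup) := by
  induction s with
  | nil => simp
  | cons a t ih =>
    cases t with
    | nil => simp
    | cons b u =>
      have hab : a ≤ b := (List.pairwise_cons.mp hs).1 b (by simp)
      have hbu : ∀ c ∈ u, b ≤ c :=
        fun c hc => (List.pairwise_cons.mp (List.pairwise_cons.mp hs).2).1 c hc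
      have ih' := ih (List.pairwise_cons.mp hs).2
      simp only [List.tail_cons] at ih'
      -- a ∈ b :: u ↔ a = b, because a ≤ b ≤ every later element
      have hmem : a ∈ b :: u ↔ a = b := by
        constructor
        · intro h
          rcases List.mem_cons.mp h with h | h
          · exact h
          · exact le_antisymm hab (hbu a h)
        · intro h; simp [h]
      simp only [List.tail_cons, List.zip_cons_cons, List.any_cons, ih']
      rw [Bool.eq_iff_iff]
      simp only [Bool.or_eq_true, beq_iff_eq, decide_eq_true_eq]
      constructor
      · rintro (h | h)
        · exact fun hn => (List.nodup_cons.mp hn).1 (hmem.mpr h)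
        · exact fun hn => h (List.nodup_cons.mp hn).2
      · intro h
        by_cases hnd : (b :: u).Nodup
        · left; apply hmem.mp; by_contra hna
          exact h (List.nodup_cons.mpr ⟨hna, hnd⟩)
        · right; exact hnd

-- ===== VERDICT (by name: the statement is the Claim_ definition above) =====
theorem has_repetitive_words_spec : Claim_equal_has_repetitive_words := by
  intro s _
  unfold Spec_has_repetitive_words has_repetitive_words has_repetitive_words_alt
  simp only [counterAny_eq_not_nodup, PySem.List.slice_from_one]
  set l := PySem.Str.split₀ (PySem.Str.lower s) with hl
  rw [adjacentEq_eq_not_nodup _ (PySem.List.sorted_pairwise l (fun x => x))]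
  have hperm : (PySem.List.sorted l (fun x => x) false).Perm l := PySem.List.sorted_perm l _ _
  simp [hperm.nodup_iff]
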